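-- pv_equiv track=rewrite | github.com/AndrewSigorskih/Impractical_Python | impractical_python/Chapter_01/etaoin.py | etaoin
-- ===== SOURCE A (Python) =====
-- from string import ascii_lowercase as alphabet
-- from collections import defaultdict
-- from typing import DefaultDict
--
-- def etaoin(text: str) -> DefaultDict[str, list]:
--     mapping = defaultdict(list)
--     for char in text:
--         char = char.lower()
--         if char in alphabet:
--             mapping[char].append(char)
--     for char in alphabet:
--         if char not in mapping:
--             mapping.__missing__(char)
--     return mapping
-- ===== SOURCE B (Python) =====
-- from string import ascii_lowercase as alphabet
-- from collections import defaultdict, Counter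
--
-- def etaoin(text):
--     # count-then-build: one Counter pass, then materialize each list as [key]*n
--     counts = Counter(c for c in map(str.lower, text) if c in alphabet)
--     mapping = defaultdict(list)
--     for key, n in counts.items():
--         mapping[key] = [key] * n
--     for char in alphabet:
--         mapping[char]  # touch: forces an empty list for absent letters
--     return mapping
-- ===== Notes on version B (the rewrite author's own statement) =====
-- stated objective: idiomatic
-- what changed: Instead of appending one element per character into a growing per-letter list, B first builds a Counter frequency table in one pass and then materializes each occurrence list as [key]*n from counts.items(), touching the 26 letters afterwards for empty defaults.
import Mathlib
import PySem

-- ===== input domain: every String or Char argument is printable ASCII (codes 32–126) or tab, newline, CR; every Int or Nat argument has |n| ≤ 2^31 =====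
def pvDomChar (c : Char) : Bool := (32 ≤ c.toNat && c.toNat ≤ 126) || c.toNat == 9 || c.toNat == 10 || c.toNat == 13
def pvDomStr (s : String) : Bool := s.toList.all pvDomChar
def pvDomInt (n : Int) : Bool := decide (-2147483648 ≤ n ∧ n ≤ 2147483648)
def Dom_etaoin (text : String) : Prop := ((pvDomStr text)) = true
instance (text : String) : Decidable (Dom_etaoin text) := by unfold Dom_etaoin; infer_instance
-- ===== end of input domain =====

-- B builds a Counter frequency table first and materializes each occurrence list as [key]*n,
-- instead of A's element-by-element appends into a growing defaultdict (objective: idiomatic).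
-- Equivalence is about the returned mapping's items (dict in insertion order); neither mutates its argument.


-- ===== PORT A =====
-- ascii_lowercase
def pyAlphabet : List Char := "abcdefghijklmnopqrstuvwxyz".toList

def etaoin (text : String) : List (String × List String) :=
  -- for char in text: char = char.lower(); if char in alphabet: mapping[char].append(char)
  -- (char.lower() on one char = lowerChar, exact on the ASCII domain; single-char 'in alphabet' = membership;
  --  defaultdict access + append = Dict.modify with default [])
  let m1 := text.toList.foldl
    (fun (d : PySem.Dict String (List String)) ch =>
      let c := PySem.Chars.lowerChar ch
      if c ∈ pyAlphabet then
        d.modify (String.singleton c) [] (· ++ [String.singleton c])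
      else d)
    PySem.Dict.empty
  -- for char in alphabet: if char not in mapping: mapping.__missing__(char)  (inserts [])
  (pyAlphabet.foldl
    (fun (d : PySem.Dict String (List String)) ch =>
      if d.contains (String.singleton ch) then d
      else d.insert (String.singleton ch) []) m1).items

-- ===== PORT B =====
def etaoin_alt (text : String) : List (String × List String) :=
  -- counts = Counter(c for c in map(str.lower, text) if c in alphabet)
  let counts := PySem.Dict.counter
    (((text.toList.map PySem.Chars.lowerChar).filter (fun c => c ∈ pyAlphabet)).map String.singleton)
  -- for key, n in counts.items(): mapping[key] = [key] * n
  let m := counts.items.foldl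
    (fun (d : PySem.Dict String (List String)) kv =>
      d.insert kv.1 (List.replicate kv.2.toNat kv.1))
    PySem.Dict.empty
  -- for char in alphabet: mapping[char]  (defaultdict touch: inserts [] if absent)
  (pyAlphabet.foldl
    (fun (d : PySem.Dict String (List String)) ch =>
      if d.contains (String.singleton ch) then d
      else d.insert (String.singleton ch) []) m).items

-- ===== PRECONDITION & SPEC =====
def Spec_etaoin (text : String) (out : List (String × List String)) : Prop := out = etaoin_alt text
instance (text : String) (out : List (String × List String)) : Decidable (Spec_etaoin text out) := by unfold Spec_etaoin; infer_instance

-- ===== CLAIM (what is proved, stated in full; the proofs are below) =====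
def Claim_equal_etaoin : Prop := ∀ (text : String), Dom_etaoin text → Spec_etaoin text (etaoin text)

-- ===== LEMMAS AND PROOFS =====

-- A's guarded per-character loop is the plain append loop over the filtered, lowered, singleton-ized characters.
theorem etaoin_loopA_eq_filtered (l : List Char) (d : PySem.Dict String (List String)) :
    l.foldl
      (fun (d : PySem.Dict String (List String)) ch =>
        let c := PySem.Chars.lowerChar ch
        if c ∈ pyAlphabet then
          d.modify (String.singleton c) [] (· ++ [String.singleton c])
        else d) d
    = (((l.map PySem.Chars.lowerChar).filter (fun c => c ∈ pyAlphabet)).map String.singleton).foldl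
        (fun (d : PySem.Dict String (List String)) s => d.modify s [] (· ++ [s])) d := by
  induction l generalizing d with
  | nil => rfl
  | cons ch t ih =>
    simp only [List.foldl_cons, List.map_cons, List.filter_cons]
    by_cases h : PySem.Chars.lowerChar ch ∈ pyAlphabet
    · simp [h, ih]
    · simp [h, ih]

-- the filter of an equality test is a replicate of the count
theorem filter_pairs_eq_replicate (ss : List String) (c : String) :
    ((ss.map (fun s => (s, s))).filter (fun p => p.1 == c)).map (fun p => p.2)
    = List.replicate (ss.count c) c := by
  rw [List.filter_map, List.map_map]
  simp only [Function.comp_def]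
  have h2 : (ss.filter (fun s => (s, s).1 == c)).map (fun s => (s, s).2) = ss.filter (fun s => s == c) := by simp
  rw [h2, List.filter_beq]

-- the append loop over ss equals B's count-then-replicate build, as dicts
theorem append_loop_eq_counter_build (ss : List String) :
    ss.foldl (fun (d : PySem.Dict String (List String)) s => d.modify s [] (· ++ [s])) PySem.Dict.empty
    = (PySem.Dict.counter ss).items.foldl
        (fun (d : PySem.Dict String (List String)) kv =>
          d.insert kv.1 (List.replicate kv.2.toNat kv.1)) PySem.Dict.empty := by
  apply PySem.Dict.ext
  -- RHS items
  rw [PySem.Dict.items_counter, List.foldl_map]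
  have hrhs := PySem.Dict.items_foldl_insert_fresh (l := PySem.Set.ofList ss)
      (k := fun k => k) (v := fun k => List.replicate ((ss.count k : Int)).toNat k)
      (d := PySem.Dict.empty)
      (by intro a _; exact PySem.Dict.contains_empty a)
      (by simp [PySem.Set.nodup_ofList])
  simp only [Int.toNat_natCast] at hrhs ⊢
  rw [hrhs]
  -- LHS items
  have hd : (ss.foldl (fun (d : PySem.Dict String (List String)) s => d.modify s [] (· ++ [s])) PySem.Dict.empty)
      = (ss.map (fun s => (s, s))).foldl
          (fun (d : PySem.Dict String (List String)) p => d.modify p.1 [] (· ++ [p.2])) PySem.Dict.empty := by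
    rw [List.foldl_map]
  rw [hd]
  have hkeys : ((ss.map (fun s => (s, s))).foldl
      (fun (d : PySem.Dict String (List String)) p => d.modify p.1 [] (· ++ [p.2])) PySem.Dict.empty).keys
      = PySem.Set.ofList ss := by
    have := PySem.Dict.keys_foldl_modify_key (l := ss.map (fun s => (s, s)))
      (key := fun p : String × String => p.1) (d0 := ([] : List String))
      (f := fun _ p v => v ++ [p.2]) (d := PySem.Dict.empty)
    simp only [PySem.Dict.keys_empty, List.map_map] at this
    rw [this, PySem.Set.update_nil_left]
    simp [Function.comp_def]
  have hnodup : ((ss.map (fun s => (s, s))).foldl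
      (fun (d : PySem.Dict String (List String)) p => d.modify p.1 [] (· ++ [p.2])) PySem.Dict.empty).keys.Nodup := by
    rw [hkeys]; exact PySem.Set.nodup_ofList ss
  rw [PySem.Dict.items_eq_map_keys _ hnodup ([] : List String), hkeys]
  apply List.map_congr_left
  intro k _
  rw [PySem.Dict.getD_foldl_modify_append]
  simp [filter_pairs_eq_replicate]

-- ===== VERDICT (by name: the statement is the Claim_ definition above) =====
theorem etaoin_spec : Claim_equal_etaoin := by
  intro text _
  unfold Spec_etaoin etaoin etaoin_alt
  rw [etaoin_loopA_eq_filtered, append_loop_eq_counter_build]
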